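-- pv_equiv track=rewrite | github.com/B-UMMI/Schema_Refinery | SchemaRefinery/utils/sequence_functions.py | determine_duplicated_seqs
-- ===== SOURCE A (Python) =====
-- from typing import List, Set, Dict, Union, Tuple, Optional, Iterator
--
-- def determine_duplicated_seqs(sequences: Dict[str, str]) -> Dict[str, List[str]]:
--     """
--     Create mapping between sequences and sequence identifiers.
--
--     Parameters
--     ----------
--     sequences : dict
--         Dictionary with sequence identifiers as keys and sequences as values.
--
--     Returns
--     -------
--     dict
--         Dictionary with sequences as keys and sequence identifiers that are associated with each sequence as values.
--     """
--     equal_seqs = {}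
--     for seqid, seq in sequences.items():
--         if seq in equal_seqs:
--             equal_seqs[seq].append(seqid)
--         else:
--             equal_seqs[seq] = [seqid]
--     return equal_seqs
-- ===== SOURCE B (Python) =====
-- def determine_duplicated_seqs(sequences: dict) -> dict:
--     """Group sequence ids by identical sequence: distinct sequences in first-occurrence
--     order, each paired with all ids carrying it (nested-scan instead of one hash pass)."""
--     items = list(sequences.items())
--     distinct = list(dict.fromkeys(sequences.values()))
--     return {seq: [sid for sid, s in items if s == seq] for seq in distinct}
-- ===== Notes on version B (the rewrite author's own statement) =====
-- stated objective: alternative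
-- what changed: Replaces the single hash-pass that mutates per-key lists with a two-phase plan: first collect the distinct sequences in first-occurrence order (dict.fromkeys), then build each group by a comprehension scanning the items for ids with that sequence.
import Mathlib
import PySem

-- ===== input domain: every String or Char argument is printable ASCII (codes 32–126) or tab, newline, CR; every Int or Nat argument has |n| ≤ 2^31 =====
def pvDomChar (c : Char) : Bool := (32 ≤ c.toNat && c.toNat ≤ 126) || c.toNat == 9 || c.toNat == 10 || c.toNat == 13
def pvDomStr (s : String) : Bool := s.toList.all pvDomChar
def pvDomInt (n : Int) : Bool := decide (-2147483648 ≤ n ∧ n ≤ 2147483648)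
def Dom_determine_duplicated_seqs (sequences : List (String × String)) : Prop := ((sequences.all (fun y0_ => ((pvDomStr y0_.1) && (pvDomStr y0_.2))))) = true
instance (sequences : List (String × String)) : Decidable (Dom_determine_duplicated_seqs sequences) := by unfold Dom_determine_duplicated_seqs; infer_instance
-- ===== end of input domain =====

-- B groups ids by building the distinct-sequence list first and then scanning the items
-- per sequence (alternative decomposition of the same grouping; not faster).


-- ===== PORT A =====
def determine_duplicated_seqs (sequences : List (String × String)) : List (String × List String) :=
  (sequences.foldl
    (fun d p =>
      match d.get? p.2 with
      | some l => d.insert p.2 (l ++ [p.1])   -- if seq in equal_seqs: equal_seqs[seq].append(seqid)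
      | none   => d.insert p.2 [p.1])         -- else: equal_seqs[seq] = [seqid]
    PySem.Dict.empty).items

-- ===== PORT B =====
def determine_duplicated_seqs_alt (sequences : List (String × String)) : List (String × List String) :=
  (PySem.List.dedup (sequences.map (·.2))).map
    (fun s => (s, (sequences.filter (fun p => p.2 == s)).map (·.1)))

-- ===== PRECONDITION & SPEC =====
def Spec_determine_duplicated_seqs (sequences : List (String × String)) (out : List (String × List String)) : Prop := out = determine_duplicated_seqs_alt sequences
instance (sequences : List (String × String)) (out : List (String × List String)) : Decidable (Spec_determine_duplicated_seqs sequences out) := by unfold Spec_determine_duplicated_seqs; infer_instance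

-- ===== CLAIM (what is proved, stated in full; the proofs are below) =====
def Claim_equal_determine_duplicated_seqs : Prop := ∀ (sequences : List (String × String)), Dom_determine_duplicated_seqs sequences → Spec_determine_duplicated_seqs sequences (determine_duplicated_seqs sequences)

-- ===== LEMMAS AND PROOFS =====

-- A's branch on membership is exactly Dict.modify with default [].
lemma stepA_eq_modify :
    (fun (d : PySem.Dict String (List String)) (p : String × String) =>
      match d.get? p.2 with
      | some l => d.insert p.2 (l ++ [p.1])
      | none   => d.insert p.2 [p.1]) =
    (fun d p => d.modify p.2 [] (· ++ [p.1])) := by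
  funext d p
  simp only [PySem.Dict.modify, PySem.Dict.getD_eq_get?_getD]
  cases d.get? p.2 <;> rfl

-- The grouping dict A builds, expressed over the swapped items.
lemma foldA_eq_swap (sequences : List (String × String)) :
    sequences.foldl (fun d p => d.modify p.2 [] (· ++ [p.1])) PySem.Dict.empty =
    (sequences.map Prod.swap).foldl (fun d p => d.modify p.1 [] (· ++ [p.2])) PySem.Dict.empty := by
  rw [List.foldl_map]
  rfl

-- ===== VERDICT (by name: the statement is the Claim_ definition above) =====
theorem determine_duplicated_seqs_spec : Claim_equal_determine_duplicated_seqs := by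
  intro sequences _
  show _ = _
  unfold determine_duplicated_seqs determine_duplicated_seqs_alt
  rw [stepA_eq_modify]
  set d := sequences.foldl (fun d p => d.modify p.2 [] (· ++ [p.1])) PySem.Dict.empty with hd
  have hnd : d.keys.Nodup := by
    rw [hd]
    exact PySem.Dict.nodup_keys_foldl_modify_key sequences (·.2) [] (fun _ p => (· ++ [p.1])) _
      PySem.Dict.nodup_keys_empty
  have hkeys : d.keys = PySem.List.dedup (sequences.map (·.2)) := by
    rw [hd, PySem.Dict.keys_foldl_modify_key]
    simp [PySem.Dict.keys_empty, PySem.Set.update, PySem.Set.ofList_eq_foldl, PySem.List.dedup_eq_ofList]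
  have hget : ∀ s, d.getD s [] = (sequences.filter (fun p => p.2 == s)).map (·.1) := by
    intro s
    rw [hd, foldA_eq_swap, PySem.Dict.getD_foldl_modify_append, PySem.Dict.getD_empty]
    rw [List.filter_map, List.map_map]
    rfl
  rw [PySem.Dict.items_eq_map_keys d hnd [], hkeys]
  apply List.map_congr_left
  intro s _
  rw [hget s]
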